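-- pv_equiv track=rewrite | github.com/ramabhadrarao/route_analytics_pro | app.py | calculate_route_safety_score
-- ===== SOURCE A (Python) =====
-- def calculate_route_safety_score(sharp_turns, dead_zones_count, poor_zones_count):
--     """Calculate overall route safety score (0-100)"""
--     base_score = 100
--
--     if not sharp_turns:
--         return base_score
--
--     # Categorize turns by severity
--     blind_spots = len([t for t in sharp_turns if t.get('angle', 0) > 80])
--     sharp_danger = len([t for t in sharp_turns if 70 <= t.get('angle', 0) <= 80])
--     moderate_turns = len([t for t in sharp_turns if 45 <= t.get('angle', 0) < 70])
--
--     # Deduct points based on severity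
--     base_score -= blind_spots * 15        # 15 points per blind spot
--     base_score -= sharp_danger * 10       # 10 points per sharp turn
--     base_score -= moderate_turns * 5      # 5 points per moderate turn
--     base_score -= dead_zones_count * 8    # 8 points per dead zone
--     base_score -= poor_zones_count * 4    # 4 points per poor coverage zone
--
--     return max(0, min(100, base_score))
-- ===== SOURCE B (Python) =====
-- def calculate_route_safety_score(sharp_turns, dead_zones_count, poor_zones_count):
--     """Calculate overall route safety score (0-100)"""
--     score = 100
--     if not sharp_turns:
--         return score
--     for t in sharp_turns:
--         angle = t.get('angle', 0)
--         if angle > 80: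
--             score -= 15
--         elif 70 <= angle:
--             score -= 10
--         elif 45 <= angle:
--             score -= 5
--     score -= dead_zones_count * 8
--     score -= poor_zones_count * 4
--     return max(0, min(100, score))
-- ===== Notes on version B (the rewrite author's own statement) =====
-- stated objective: simpler
-- what changed: Replaces A's three separate counting comprehensions (one full scan of sharp_turns per severity class) with a single pass that reads each turn's angle once and subtracts its deduction from a running score.
import Mathlib
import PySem

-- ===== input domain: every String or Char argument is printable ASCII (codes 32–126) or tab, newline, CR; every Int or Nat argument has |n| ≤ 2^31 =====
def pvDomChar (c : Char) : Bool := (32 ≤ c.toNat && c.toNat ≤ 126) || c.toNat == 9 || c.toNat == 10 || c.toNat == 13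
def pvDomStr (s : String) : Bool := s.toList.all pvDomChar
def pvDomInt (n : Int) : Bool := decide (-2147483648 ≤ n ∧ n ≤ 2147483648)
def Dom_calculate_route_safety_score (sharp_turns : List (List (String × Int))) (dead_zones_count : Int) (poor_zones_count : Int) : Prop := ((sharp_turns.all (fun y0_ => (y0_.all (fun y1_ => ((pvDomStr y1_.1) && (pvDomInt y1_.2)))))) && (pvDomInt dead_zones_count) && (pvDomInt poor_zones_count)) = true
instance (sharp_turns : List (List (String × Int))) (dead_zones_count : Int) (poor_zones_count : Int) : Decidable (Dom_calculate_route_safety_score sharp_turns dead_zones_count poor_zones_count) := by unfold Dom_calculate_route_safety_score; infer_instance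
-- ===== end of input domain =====

-- B replaces A's three counting comprehensions with one accumulator pass over the turns (objective: simpler).

-- t.get('angle', 0): first-match lookup in the association list (dict convention)
def pyGetAngle (t : List (String × Int)) : Int := (PySem.Dict.mk t).getD "angle" 0

-- ===== PORT A =====
def calculate_route_safety_score (sharp_turns : List (List (String × Int))) (dead_zones_count : Int) (poor_zones_count : Int) : Int :=
  let base_score : Int := 100
  if sharp_turns = [] then base_score
  else
    let blind_spots : Int := (sharp_turns.filter (fun t => pyGetAngle t > 80)).length
    let sharp_danger : Int := (sharp_turns.filter (fun t => 70 ≤ pyGetAngle t ∧ pyGetAngle t ≤ 80)).length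
    let moderate_turns : Int := (sharp_turns.filter (fun t => 45 ≤ pyGetAngle t ∧ pyGetAngle t < 70)).length
    let base_score := base_score - blind_spots * 15
    let base_score := base_score - sharp_danger * 10
    let base_score := base_score - moderate_turns * 5
    let base_score := base_score - dead_zones_count * 8
    let base_score := base_score - poor_zones_count * 4
    max 0 (min 100 base_score)

-- ===== PORT B =====
def calculate_route_safety_score_alt (sharp_turns : List (List (String × Int))) (dead_zones_count : Int) (poor_zones_count : Int) : Int :=
  let score : Int := 100
  if sharp_turns = [] then score
  else
    let score := sharp_turns.foldl (fun s t =>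
      let angle := pyGetAngle t
      if angle > 80 then s - 15
      else if 70 ≤ angle then s - 10
      else if 45 ≤ angle then s - 5
      else s) score
    let score := score - dead_zones_count * 8
    let score := score - poor_zones_count * 4
    max 0 (min 100 score)

-- ===== PRECONDITION & SPEC =====
def Spec_calculate_route_safety_score (sharp_turns : List (List (String × Int))) (dead_zones_count : Int) (poor_zones_count : Int) (out : Int) : Prop := out = calculate_route_safety_score_alt sharp_turns dead_zones_count poor_zones_count
instance (sharp_turns : List (List (String × Int))) (dead_zones_count : Int) (poor_zones_count : Int) (out : Int) : Decidable (Spec_calculate_route_safety_score sharp_turns dead_zones_count poor_zones_count out) := by unfold Spec_calculate_route_safety_score; infer_instance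

-- ===== CLAIM (what is proved, stated in full; the proofs are below) =====
def Claim_equal_calculate_route_safety_score : Prop := ∀ (sharp_turns : List (List (String × Int))) (dead_zones_count : Int) (poor_zones_count : Int), Dom_calculate_route_safety_score sharp_turns dead_zones_count poor_zones_count → Spec_calculate_route_safety_score sharp_turns dead_zones_count poor_zones_count (calculate_route_safety_score sharp_turns dead_zones_count poor_zones_count)

-- ===== LEMMAS AND PROOFS =====

-- the single-pass fold equals the start value minus the three weighted filter counts
theorem fold_eq_counts (l : List (List (String × Int))) : ∀ (s : Int),
    l.foldl (fun s t =>
      let angle := pyGetAngle t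
      if angle > 80 then s - 15
      else if 70 ≤ angle then s - 10
      else if 45 ≤ angle then s - 5
      else s) s
    = s - ((l.filter (fun t => pyGetAngle t > 80)).length : Int) * 15
        - ((l.filter (fun t => 70 ≤ pyGetAngle t ∧ pyGetAngle t ≤ 80)).length : Int) * 10
        - ((l.filter (fun t => 45 ≤ pyGetAngle t ∧ pyGetAngle t < 70)).length : Int) * 5 := by
  induction l with
  | nil => intro s; simp
  | cons t rest ih =>
    intro s
    simp only [List.foldl_cons, List.filter_cons, ih, decide_eq_true_eq]
    split_ifs <;> (try simp only [List.length_cons]) <;> (try push_cast) <;> omega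

-- ===== VERDICT (by name: the statement is the Claim_ definition above) =====
theorem calculate_route_safety_score_spec : Claim_equal_calculate_route_safety_score := by
  intro st dz pz _
  unfold Spec_calculate_route_safety_score calculate_route_safety_score calculate_route_safety_score_alt
  by_cases h : st = []
  · simp [h]
  · simp only [h, if_false]
    rw [fold_eq_counts]
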